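-- pv_equiv track=rewrite | github.com/Classic-username/Guess-The-Word-Python | main.py | hide_word
-- ===== SOURCE A (Python) =====
-- def hide_word(word):
--   hidden_word = ""
--   for index in range(len(word)):
--     if index == 0:
--       hidden_word += word[index]
--     else:
--       hidden_word += "*"
--   return hidden_word
-- ===== SOURCE B (Python) =====
-- def hide_word(word):
--   if not word:
--     return ""
--   return word[0] + "*" * (len(word) - 1)
-- ===== Notes on version B (the rewrite author's own statement) =====
-- stated objective: simpler
-- what changed: Replaces the per-index accumulation loop with a closed-form expression: first character plus a repeated-asterisk string of length len(word)-1 (empty-string guard for the zero-iteration case).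
import Mathlib
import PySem

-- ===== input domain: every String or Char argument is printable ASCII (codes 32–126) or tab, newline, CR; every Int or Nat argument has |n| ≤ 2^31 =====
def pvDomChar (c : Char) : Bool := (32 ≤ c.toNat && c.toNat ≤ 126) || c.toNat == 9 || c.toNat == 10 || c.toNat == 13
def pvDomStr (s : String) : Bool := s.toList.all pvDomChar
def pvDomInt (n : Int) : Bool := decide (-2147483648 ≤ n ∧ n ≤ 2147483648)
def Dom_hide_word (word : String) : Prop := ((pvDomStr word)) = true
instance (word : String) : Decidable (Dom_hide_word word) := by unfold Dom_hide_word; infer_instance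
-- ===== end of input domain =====

-- B replaces A's per-index accumulation loop with a closed-form construction (first char ++ repeated '*'); objective: simpler.

-- ===== PORT A =====
-- A: loop over range(len(word)), appending word[index] at index 0 and "*" otherwise.
def hide_word (word : String) : String :=
  String.ofList ((PySem.List.pyRange 0 (PySem.Str.len word) 1).foldl
    (fun acc index =>
      if index == 0 then
        acc ++ ((PySem.Str.pyGet? word index).elim [] ([·]))  -- word[index]; index is always in range here
      else
        acc ++ ['*'])
    [])

-- ===== PORT B =====
def hide_word_alt (word : String) : String :=
  match word.toList with
  | [] => ""
  | c :: rest => String.ofList (c :: List.replicate rest.length '*')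

-- ===== PRECONDITION & SPEC =====
def Spec_hide_word (word : String) (out : String) : Prop := out = hide_word_alt word
instance (word : String) (out : String) : Decidable (Spec_hide_word word out) := by unfold Spec_hide_word; infer_instance

-- ===== CLAIM (what is proved, stated in full; the proofs are below) =====
def Claim_equal_hide_word : Prop := ∀ (word : String), Dom_hide_word word → Spec_hide_word word (hide_word word)

-- ===== LEMMAS AND PROOFS =====

-- A's loop after index 0: every remaining index is nonzero, so each step appends one '*'.
theorem star_fold (f : List Char → Int → List Char)
    (hf : ∀ acc i, i ≠ 0 → f acc i = acc ++ ['*'])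
    (l : List Int) (h : ∀ i ∈ l, i ≠ (0 : Int)) (a : List Char) :
    l.foldl f a = a ++ List.replicate l.length '*' := by
  induction l generalizing a with
  | nil => simp
  | cons x xs ih =>
    simp only [List.foldl_cons, List.length_cons]
    rw [hf a x (h x (List.mem_cons_self))]
    rw [ih (fun i hi => h i (List.mem_cons_of_mem _ hi))]
    simp [List.replicate_succ, List.append_assoc]

-- ===== VERDICT (by name: the statement is the Claim_ definition above) =====
theorem hide_word_spec : Claim_equal_hide_word := by
  intro word _
  unfold Spec_hide_word hide_word hide_word_alt
  cases hw : word.toList with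
  | nil =>
    simp [PySem.Str.len_eq, hw, PySem.List.pyRange_one_eq_nil]
  | cons c rest =>
    have hlen : PySem.Str.len word = ((rest.length + 1 : Nat) : Int) := by
      simp [PySem.Str.len_eq, hw]
    rw [hlen, PySem.List.pyRange_one_cons (by positivity)]
    simp only [List.foldl_cons]
    rw [star_fold _ (fun acc i hi => by simp [hi]) _
      (fun i hi => by
        have := (PySem.List.mem_pyRange_one).mp hi
        omega)]
    simp [pysem, hw, zero_add]
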